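-- pv_equiv track=rewrite | github.com/saysh0/saysho-homeworks | praktika.python.11.25-03-26.py | task_queue
-- ===== SOURCE A (Python) =====
-- def task_queue(kwargs: dict):
--     time_limit = 10
--     end_dict = {}
--     kwargs = sorted(kwargs.items(), key=lambda item: -item[1])
--     while time_limit != 0 and kwargs:
--         task, time = kwargs.pop(0)
--         if time_limit - time < 0:
--             continue
--         time_limit -= time
--         end_dict[task] = time
--     return end_dict
-- ===== SOURCE B (Python) =====
-- def task_queue(kwargs: dict):
--     # Descending-sorted items; instead of scanning (and popping) item by item,
--     # binary-search the next item that fits the remaining budget, jumping over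
--     # all too-large items at once.
--     items = sorted(kwargs.items(), key=lambda kv: kv[1], reverse=True)
--     n = len(items)
--     result = {}
--     i = 0
--     limit = 10
--     while limit != 0:
--         # first index j in [i, n) with items[j][1] <= limit
--         # (valid: the time column is non-increasing)
--         lo, hi = i, n
--         while lo < hi:
--             mid = (lo + hi) // 2
--             if items[mid][1] > limit:
--                 lo = mid + 1
--             else:
--                 hi = mid
--         if lo == n:
--             break
--         task, t = items[lo]
--         result[task] = t
--         limit -= t
--         i = lo + 1
--     return result
-- ===== Notes on version B (the rewrite author's own statement) =====
-- stated objective: faster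
-- what changed: Instead of popping the descending-sorted queue item by item and testing each against the budget, B keeps an index into the sorted list and binary-searches the next item that still fits the remaining budget, jumping over every too-large item at once.
import Mathlib
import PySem

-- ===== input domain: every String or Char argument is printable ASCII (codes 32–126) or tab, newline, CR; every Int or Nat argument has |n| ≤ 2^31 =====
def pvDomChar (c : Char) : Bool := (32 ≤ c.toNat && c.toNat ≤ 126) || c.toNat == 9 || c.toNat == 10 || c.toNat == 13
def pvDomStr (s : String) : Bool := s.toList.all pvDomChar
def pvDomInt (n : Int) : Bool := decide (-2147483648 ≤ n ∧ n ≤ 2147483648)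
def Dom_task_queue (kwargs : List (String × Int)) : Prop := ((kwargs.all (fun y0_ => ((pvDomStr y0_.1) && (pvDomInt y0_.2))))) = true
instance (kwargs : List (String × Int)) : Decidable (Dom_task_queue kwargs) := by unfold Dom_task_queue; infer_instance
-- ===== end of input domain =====

-- B changes: instead of popping the descending-sorted queue item by item, B binary-searches
-- the next item that fits the remaining budget, jumping over too-large items at once — faster.

-- ===== PORT A =====
-- while time_limit != 0 and kwargs: pop(0); skip if it does not fit; else take it
def pvTaskLoop (tl : Int) (ks : List (String × Int)) (d : PySem.Dict String Int) :
    PySem.Dict String Int :=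
  match ks with
  | [] => d
  | (task, time) :: rest =>
    if tl = 0 then d
    else if tl - time < 0 then pvTaskLoop tl rest d
    else pvTaskLoop (tl - time) rest (d.insert task time)

def task_queue (kwargs : List (String × Int)) : List (String × Int) :=
  (pvTaskLoop 10 (PySem.List.sorted kwargs (fun item => -item.2) false) PySem.Dict.empty).items

-- ===== PORT B =====
-- inner while lo < hi: binary search for the first index j ≥ lo with items[j][1] <= limit
-- (indexing items[mid] is always in range in Python; ported with getD.
--  fuel = hi - lo is a totality guard only: it strictly decreases each iteration)
def pvBsearch (items : List (String × Int)) (limit : Int) :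
    Nat → Nat → Nat → Nat
  | 0, lo, _ => lo
  | fuel + 1, lo, hi =>
    if lo < hi then
      let mid := (lo + hi) / 2
      if limit < (items.getD mid ("", 0)).2 then pvBsearch items limit fuel (mid + 1) hi
      else pvBsearch items limit fuel lo mid
    else lo

-- outer while limit != 0: jump to the next fitting item, break when none is left
-- (Python's break test 'lo == n' is ported as 'n ≤ lo'; lo ≤ n always holds there.
--  fuel is a totality guard only: the index i strictly increases each iteration)
def pvBLoop (items : List (String × Int)) :
    Nat → Int → Nat → PySem.Dict String Int → PySem.Dict String Int
  | 0, _, _, d => d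
  | fuel + 1, limit, i, d =>
    if limit = 0 then d
    else
      let lo := pvBsearch items limit (items.length - i) i items.length
      if items.length ≤ lo then d
      else
        let p := items.getD lo ("", 0)
        pvBLoop items fuel (limit - p.2) (lo + 1) (d.insert p.1 p.2)

def task_queue_alt (kwargs : List (String × Int)) : List (String × Int) :=
  let items := PySem.List.sorted kwargs (fun kv => kv.2) true
  (pvBLoop items (items.length + 1) 10 0 PySem.Dict.empty).items

-- ===== PRECONDITION & SPEC =====
def Spec_task_queue (kwargs : List (String × Int)) (out : List (String × Int)) : Prop := out = task_queue_alt kwargs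
instance (kwargs : List (String × Int)) (out : List (String × Int)) : Decidable (Spec_task_queue kwargs out) := by unfold Spec_task_queue; infer_instance

-- ===== CLAIM (what is proved, stated in full; the proofs are below) =====
def Claim_equal_task_queue : Prop := ∀ (kwargs : List (String × Int)), Dom_task_queue kwargs → Spec_task_queue kwargs (task_queue kwargs)

-- ===== LEMMAS AND PROOFS =====

-- sorted(key=-v) ascending is sorted(key=v, reverse=True)
theorem pv_sorted_neg_eq_rev (xs : List (String × Int)) :
    PySem.List.sorted xs (fun item => -item.2) false
      = PySem.List.sorted xs (fun it => it.2) true := by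
  simp only [PySem.List.sorted, if_pos, Bool.false_eq_true, if_false]
  congr 1
  funext acc x
  congr 1
  funext a b
  simp

-- the value column of the descending-sorted list is non-increasing (in getD form)
theorem pv_mono_of_pairwise (items : List (String × Int))
    (h : items.Pairwise (fun a b => b.2 ≤ a.2)) :
    ∀ p q : Nat, p ≤ q → q < items.length →
      (items.getD q ("", 0)).2 ≤ (items.getD p ("", 0)).2 := by
  intro p q hpq hq
  have hp : p < items.length := lt_of_le_of_lt hpq hq
  rw [List.getD_eq_getElem items _ hq, List.getD_eq_getElem items _ hp]
  rcases Nat.eq_or_lt_of_le hpq with rfl | hlt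
  · exact le_refl _
  · exact (List.pairwise_iff_getElem.mp h) p q hp hq hlt

-- the search never moves left
theorem pvBsearch_ge (items : List (String × Int)) (limit : Int) :
    ∀ (fuel lo hi : Nat), lo ≤ pvBsearch items limit fuel lo hi := by
  intro fuel
  induction fuel with
  | zero => intro lo hi; simp [pvBsearch]
  | succ m ih =>
    intro lo hi
    rw [pvBsearch]
    by_cases hlt : lo < hi
    · simp only [if_pos hlt]
      by_cases hc : limit < (items.getD ((lo + hi) / 2) ("", 0)).2
      · simp only [if_pos hc]
        exact le_trans (by omega) (ih ((lo + hi) / 2 + 1) hi)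
      · simp only [if_neg hc]
        exact ih lo ((lo + hi) / 2)
    · simp [if_neg hlt]

-- binary search finds the first index in [lo, hi) whose value fits the budget
theorem pvBsearch_spec (items : List (String × Int)) (limit : Int)
    (hmono : ∀ p q : Nat, p ≤ q → q < items.length →
      (items.getD q ("", 0)).2 ≤ (items.getD p ("", 0)).2) :
    ∀ (fuel lo hi : Nat), hi - lo ≤ fuel → lo ≤ hi → hi ≤ items.length →
      pvBsearch items limit fuel lo hi ≤ hi ∧
      (∀ k, lo ≤ k → k < pvBsearch items limit fuel lo hi →
        limit < (items.getD k ("", 0)).2) ∧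
      (pvBsearch items limit fuel lo hi < hi →
        (items.getD (pvBsearch items limit fuel lo hi) ("", 0)).2 ≤ limit) := by
  intro fuel
  induction fuel with
  | zero =>
    intro lo hi hm hle hn
    have heq : lo = hi := by omega
    subst heq
    exact ⟨by simp [pvBsearch], fun k h1 h2 => by simp [pvBsearch] at h2; omega,
      fun h => absurd h (by simp [pvBsearch])⟩
  | succ m ih =>
    intro lo hi hm hle hn
    rw [pvBsearch]
    by_cases hlt : lo < hi
    · simp only [if_pos hlt]
      set mid := (lo + hi) / 2 with hmid
      have hmlo : lo ≤ mid := by omega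
      have hmhi : mid < hi := by omega
      by_cases hc : limit < (items.getD mid ("", 0)).2
      · simp only [if_pos hc]
        obtain ⟨h1, h2, h3⟩ := ih (mid + 1) hi (by omega) (by omega) hn
        refine ⟨h1, ?_, h3⟩
        intro k hk1 hk2
        by_cases hkm : k ≤ mid
        · exact lt_of_lt_of_le hc (hmono k mid hkm (by omega))
        · exact h2 k (by omega) hk2
      · simp only [if_neg hc]
        obtain ⟨h1, h2, h3⟩ := ih lo mid (by omega) (by omega) (by omega)
        refine ⟨by omega, h2, ?_⟩
        intro _
        by_cases hr : pvBsearch items limit m lo mid < mid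
        · exact h3 hr
        · have hge := pvBsearch_ge items limit m lo mid
          have heq : pvBsearch items limit m lo mid = mid := by omega
          rw [heq]
          omega
    · simp only [if_neg hlt]
      exact ⟨hle, fun k h1 h2 => absurd h2 (by omega), fun h => absurd h hlt⟩

-- A's pop-and-skip pass over the suffix from j ignores every non-fitting item up to r
theorem pv_skip (items : List (String × Int)) (limit : Int) (h0 : limit ≠ 0) :
    ∀ (m j r : Nat), r - j ≤ m → j ≤ r → r ≤ items.length →
      (∀ k, j ≤ k → k < r → limit < (items.getD k ("", 0)).2) →
      ∀ d, pvTaskLoop limit (items.drop j) d = pvTaskLoop limit (items.drop r) d := by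
  intro m
  induction m with
  | zero =>
    intro j r hm hjr _ _ d
    have : j = r := by omega
    subst this; rfl
  | succ m ih =>
    intro j r hm hjr hrn hgt d
    rcases Nat.eq_or_lt_of_le hjr with rfl | hlt
    · rfl
    · have hjn : j < items.length := by omega
      rw [List.drop_eq_getElem_cons hjn]
      have hbig : limit < items[j].2 := by
        have := hgt j (le_refl j) hlt
        rwa [List.getD_eq_getElem items _ hjn] at this
      show pvTaskLoop limit ((items[j].1, items[j].2) :: items.drop (j + 1)) d = _
      rw [pvTaskLoop]
      simp only [if_neg h0, if_pos (by omega : limit - items[j].2 < 0)]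
      exact ih (j + 1) r (by omega) (by omega) hrn (fun k hk1 hk2 => hgt k (by omega) hk2) d

-- the main correspondence: B's jump loop from index i equals A's pop loop on the suffix
theorem pv_main (items : List (String × Int))
    (hpw : items.Pairwise (fun a b => b.2 ≤ a.2)) :
    ∀ (fuel i : Nat) (limit : Int) (d : PySem.Dict String Int),
      items.length - i < fuel → i ≤ items.length →
      pvBLoop items fuel limit i d = pvTaskLoop limit (items.drop i) d := by
  have hmono := pv_mono_of_pairwise items hpw
  intro fuel
  induction fuel with
  | zero => intro i limit d hm hin; omega
  | succ m ih =>
    intro i limit d hm hin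
    rw [pvBLoop]
    by_cases h0 : limit = 0
    · simp only [if_pos h0]
      cases hdrop : items.drop i with
      | nil => rfl
      | cons p rest => obtain ⟨t, v⟩ := p; rw [pvTaskLoop]; simp [h0]
    · simp only [if_neg h0]
      set lo := pvBsearch items limit (items.length - i) i items.length with hlo
      obtain ⟨hle, hall, hfit⟩ :=
        pvBsearch_spec items limit hmono (items.length - i) i items.length
          (le_refl _) hin (le_refl _)
      have hgei := pvBsearch_ge items limit (items.length - i) i items.length
      by_cases hbrk : items.length ≤ lo
      · simp only [if_pos hbrk]
        rw [pv_skip items limit h0 (items.length - i) i items.length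
          (le_refl _) hin (le_refl _)
          (fun k hk1 hk2 => hall k hk1 (by omega)) d]
        rw [List.drop_length]
        rfl
      · simp only [if_neg hbrk]
        have hlon : lo < items.length := by omega
        rw [pv_skip items limit h0 (items.length - i) i lo
          (by omega) hgei (by omega) hall d]
        rw [List.drop_eq_getElem_cons hlon]
        have hfit2 : items[lo].2 ≤ limit := by
          have := hfit hlon
          rwa [List.getD_eq_getElem items _ hlon] at this
        show _ = pvTaskLoop limit ((items[lo].1, items[lo].2) :: items.drop (lo + 1)) d
        rw [pvTaskLoop]
        simp only [if_neg h0, if_neg (by omega : ¬ limit - items[lo].2 < 0)]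
        rw [ih (lo + 1) (limit - (items.getD lo ("", 0)).2)
          (d.insert (items.getD lo ("", 0)).1 (items.getD lo ("", 0)).2) (by omega) (by omega)]
        rw [List.getD_eq_getElem items _ hlon]

-- ===== VERDICT (by name: the statement is the Claim_ definition above) =====
theorem task_queue_spec : Claim_equal_task_queue := by
  intro kwargs _
  unfold Spec_task_queue task_queue task_queue_alt
  rw [pv_sorted_neg_eq_rev]
  set items := PySem.List.sorted kwargs (fun kv : String × Int => kv.2) true with hit
  have hpw : items.Pairwise (fun a b => b.2 ≤ a.2) :=
    PySem.List.sorted_pairwise_rev kwargs (fun kv => kv.2)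
  show (pvTaskLoop 10 items PySem.Dict.empty).items
    = (pvBLoop items (items.length + 1) 10 0 PySem.Dict.empty).items
  rw [pv_main items hpw (items.length + 1) 0 10 PySem.Dict.empty (by omega) (by omega)]
  rfl
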